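-- pv_equiv track=rewrite | github.com/pololee/oj-leetcode | zhaoyu/MinimumNumberOfMoves.py | min_moves_non_descreasing
-- ===== SOURCE A (Python) =====
-- def min_moves_non_descreasing(nums):
--     a = nums
--     b = sorted(nums)
--
--     size = len(nums)
--     DP = [[0 for _ in range(size)]
--           for _ in range(size)]
--
--     DP[0][0] = abs(a[0] - b[0])
--
--     for i in range(1, size):
--         DP[i][0] = DP[i-1][0] + abs(a[i] - b[0])
--
--     for j in range(1, size):
--         DP[0][j] = min(DP[0][j-1], abs(a[0] - b[j]))
--
--     for i in range(1, size):
--         for j in range(1, size):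
--             DP[i][j] = min(DP[i][j-1], DP[i-1][j] + abs(a[i] - b[j]))
--
--     return DP[size - 1][size - 1]
-- ===== SOURCE B (Python) =====
-- def min_moves_non_descreasing(nums):
--     # slope-trick greedy: keep the multiset of upper breakpoints; for each x,
--     # if the current maximum breakpoint exceeds x, pay (max - x) and lower it to x.
--     tops = []
--     ans = 0
--     for x in nums:
--         tops.append(x)
--         m = max(tops)
--         if m > x:
--             ans += m - x
--             tops.remove(m)
--             tops.append(x)
--     return ans
-- ===== Notes on version B (the rewrite author's own statement) =====
-- stated objective: faster
-- what changed: B abandons A's n-by-n table DP over (position, sorted-value) pairs for the slope-trick greedy: one left-to-right pass keeping a multiset of breakpoints, paying max(tops)-x whenever the running maximum exceeds the new element; the proof shows the greedy state encodes A's whole DP row as a piecewise-linear function.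
import Mathlib
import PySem

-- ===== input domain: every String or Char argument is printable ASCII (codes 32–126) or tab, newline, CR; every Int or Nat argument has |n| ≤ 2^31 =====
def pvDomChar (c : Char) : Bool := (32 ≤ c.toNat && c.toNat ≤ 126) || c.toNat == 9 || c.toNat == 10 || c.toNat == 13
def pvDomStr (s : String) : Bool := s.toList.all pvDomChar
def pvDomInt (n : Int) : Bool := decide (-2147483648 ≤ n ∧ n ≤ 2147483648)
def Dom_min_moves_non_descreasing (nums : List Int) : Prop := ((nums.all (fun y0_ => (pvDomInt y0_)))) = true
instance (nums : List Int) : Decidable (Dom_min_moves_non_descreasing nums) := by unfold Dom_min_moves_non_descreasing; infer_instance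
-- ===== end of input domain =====

-- B replaces A's n×n table DP by the slope-trick greedy (one pass with a multiset of
-- breakpoints, paying max(tops) - x when the running maximum exceeds the element).

-- ===== PORT A =====

-- xs[i] (every index A uses is in range under Pre_)
def pvGetA (xs : List Int) (i : Int) : Int := PySem.List.pyGetD xs i 0

-- DP[i][j] read / write on the nested table
def pvGet2 (t : List (List Int)) (i j : Int) : Int :=
  PySem.List.pyGetD (PySem.List.pyGetD t i []) j 0

def pvSet2 (t : List (List Int)) (i j : Int) (v : Int) : List (List Int) :=
  PySem.List.pySetD t i (PySem.List.pySetD (PySem.List.pyGetD t i []) j v)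

def min_moves_non_descreasing (nums : List Int) : Int :=
  let a := nums
  let b := PySem.List.sorted nums (fun x => x) false
  let size := PySem.List.len nums
  let dp0 : List (List Int) :=
    (PySem.List.pyRange 0 size 1).map (fun _ => (PySem.List.pyRange 0 size 1).map (fun _ => (0 : Int)))
  let dp1 := pvSet2 dp0 0 0 |pvGetA a 0 - pvGetA b 0|
  let dp2 := (PySem.List.pyRange 1 size 1).foldl
    (fun t i => pvSet2 t i 0 (pvGet2 t (i-1) 0 + |pvGetA a i - pvGetA b 0|)) dp1
  let dp3 := (PySem.List.pyRange 1 size 1).foldl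
    (fun t j => pvSet2 t 0 j (min (pvGet2 t 0 (j-1)) |pvGetA a 0 - pvGetA b j|)) dp2
  let dp4 := (PySem.List.pyRange 1 size 1).foldl
    (fun t i => (PySem.List.pyRange 1 size 1).foldl
      (fun t j => pvSet2 t i j (min (pvGet2 t i (j-1)) (pvGet2 t (i-1) j + |pvGetA a i - pvGetA b j|))) t) dp3
  pvGet2 dp4 (size - 1) (size - 1)

-- ===== PORT B =====

-- one iteration of Source B's loop: tops.append(x); m = max(tops); if m > x: pay m-x, replace m by x
def pvStepB (st : List Int × Int) (x : Int) : List Int × Int :=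
  let tops := st.1 ++ [x]
  let m := (PySem.List.max? tops (fun y => y)).getD 0
  if m > x then ((PySem.List.remove? tops m).getD tops ++ [x], st.2 + (m - x))
  else (tops, st.2)

def min_moves_non_descreasing_alt (nums : List Int) : Int :=
  (nums.foldl pvStepB ([], 0)).2

-- ===== PRECONDITION & SPEC =====
-- Pre_ excludes only the empty list, on which A raises IndexError.
def Pre_min_moves_non_descreasing (nums : List Int) : Prop := nums ≠ []
instance (nums : List Int) : Decidable (Pre_min_moves_non_descreasing nums) := by
  unfold Pre_min_moves_non_descreasing; infer_instance

def pvWitness_min_moves_non_descreasing : List Int := [3, 1, 2]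

def Spec_min_moves_non_descreasing (nums : List Int) (out : Int) : Prop := out = min_moves_non_descreasing_alt nums
instance (nums : List Int) (out : Int) : Decidable (Spec_min_moves_non_descreasing nums out) := by unfold Spec_min_moves_non_descreasing; infer_instance

-- ===== CLAIM (what is proved, stated in full; the proofs are below) =====
def Claim_equal_min_moves_non_descreasing : Prop := ∀ (nums : List Int), Dom_min_moves_non_descreasing nums → Pre_min_moves_non_descreasing nums → Spec_min_moves_non_descreasing nums (min_moves_non_descreasing nums)


-- ===== LEMMAS AND PROOFS =====

-- the DP recurrence A computes: pvT a b i j = DP[i][j]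
def pvCost (a b : List Int) (i j : Nat) : Int := |a.getD i 0 - b.getD j 0|

def pvT (a b : List Int) : Nat → Nat → Int
  | 0, 0 => pvCost a b 0 0
  | (i+1), 0 => pvT a b i 0 + pvCost a b (i+1) 0
  | 0, (j+1) => min (pvT a b 0 j) (pvCost a b 0 (j+1))
  | (i+1), (j+1) => min (pvT a b (i+1) j) (pvT a b i (j+1) + pvCost a b (i+1) (j+1))
termination_by i j => i + j

-- ---- table accessors, Nat-index forms ----
def pvG2 (t : List (List Int)) (i j : Nat) : Int := (t.getD i []).getD j 0
def pvS2 (t : List (List Int)) (i j : Nat) (v : Int) : List (List Int) :=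
  t.set i ((t.getD i []).set j v)
def pvDims (t : List (List Int)) (n : Nat) : Prop := t.length = n ∧ ∀ r ∈ t, r.length = n

lemma pvGetD_toNat {α : Type} (xs : List α) (i : Int) (d : α) (h : 0 ≤ i) :
    PySem.List.pyGetD xs i d = xs.getD i.toNat d := by
  conv_lhs => rw [← Int.toNat_of_nonneg h]
  rw [PySem.List.pyGetD_natCast]

lemma pvGetA_toNat (xs : List Int) (i : Int) (h : 0 ≤ i) : pvGetA xs i = xs.getD i.toNat 0 :=
  pvGetD_toNat xs i 0 h

lemma pvGet2_toNat (t : List (List Int)) (i j : Int) (hi : 0 ≤ i) (hj : 0 ≤ j) :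
    pvGet2 t i j = pvG2 t i.toNat j.toNat := by
  rw [pvGet2, pvG2, pvGetD_toNat _ _ _ hi, pvGetD_toNat _ _ _ hj]

lemma pvSet2_toNat (t : List (List Int)) (i j : Int) (v : Int) (hi : 0 ≤ i) (hj : 0 ≤ j) :
    pvSet2 t i j v = pvS2 t i.toNat j.toNat v := by
  rw [pvSet2, pvS2, PySem.List.pySetD_of_nonneg _ _ hi, PySem.List.pySetD_of_nonneg _ _ hj,
    pvGetD_toNat _ _ _ hi]

lemma pvGetD_mem (t : List (List Int)) (i : Nat) (h : i < t.length) : t.getD i [] ∈ t := by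
  rw [List.getD_eq_getElem t [] h]; exact List.getElem_mem _

lemma pvGetD_set_self {α : Type} (l : List α) (i : Nat) (a d : α) (h : i < l.length) :
    (l.set i a).getD i d = a := by
  rw [List.getD_eq_getElem?_getD, List.getElem?_set_self h, Option.getD_some]

lemma pvGetD_set_ne {α : Type} (l : List α) {i j : Nat} (a d : α) (h : i ≠ j) :
    (l.set i a).getD j d = l.getD j d := by
  rw [List.getD_eq_getElem?_getD, List.getElem?_set_ne h, ← List.getD_eq_getElem?_getD]

lemma pvDims_pvS2 {t : List (List Int)} {n : Nat} (h : pvDims t n) (i j : Nat) (v : Int) :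
    pvDims (pvS2 t i j v) n := by
  obtain ⟨h1, h2⟩ := h
  by_cases hi : i < t.length
  · refine ⟨by simp [pvS2, h1], ?_⟩
    intro r hr
    rcases List.mem_or_eq_of_mem_set hr with h | h
    · exact h2 r h
    · subst h
      simp only [List.length_set]
      exact h2 _ (pvGetD_mem t i hi)
  · rw [pvS2, List.set_eq_of_length_le (by omega)]
    exact ⟨h1, h2⟩

lemma pvG2_pvS2_same {t : List (List Int)} {n : Nat} (h : pvDims t n) {i j : Nat}
    (hi : i < n) (hj : j < n) (v : Int) : pvG2 (pvS2 t i j v) i j = v := by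
  obtain ⟨h1, h2⟩ := h
  have hi' : i < t.length := h1 ▸ hi
  have hr : (t.getD i []).length = n := h2 _ (pvGetD_mem t i hi')
  rw [pvG2, pvS2, pvGetD_set_self _ _ _ _ hi', pvGetD_set_self _ _ _ _ (by omega)]

lemma pvG2_pvS2_ne {t : List (List Int)} {i j i' j' : Nat} (hne : i ≠ i' ∨ j ≠ j') (v : Int) :
    pvG2 (pvS2 t i j v) i' j' = pvG2 t i' j' := by
  unfold pvG2 pvS2
  by_cases hii : i = i'
  · subst hii
    have hj : j ≠ j' := by tauto
    by_cases hi : i < t.length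
    · rw [pvGetD_set_self _ _ _ _ hi, pvGetD_set_ne _ _ _ hj]
    · rw [List.set_eq_of_length_le (by omega)]
  · rw [pvGetD_set_ne _ _ _ hii]

-- ---- range bookkeeping ----
lemma pvPyRangeNat (n : Nat) :
    PySem.List.pyRange 1 (n : Int) 1 = (List.range' 1 (n-1)).map (fun k : Nat => (k : Int)) := by
  rw [PySem.List.pyRange_one, List.range'_eq_map_range]
  have h : ((n:Int) - 1).toNat = n - 1 := by omega
  rw [h, List.map_map]
  apply List.map_congr_left
  intro k _
  simp

-- ---- A side: the four loop phases fill the table with pvT ----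
lemma pvPhase2 (a b : List Int) (n : Nat) (t1 : List (List Int))
    (h1 : pvDims t1 n) (hT : pvG2 t1 0 0 = pvT a b 0 0) :
    ∀ m, m < n →
      pvDims ((List.range' 1 m).foldl
        (fun t i => pvS2 t i 0 (pvG2 t (i-1) 0 + pvCost a b i 0)) t1) n ∧
      (∀ i, i ≤ m → pvG2 ((List.range' 1 m).foldl
        (fun t i => pvS2 t i 0 (pvG2 t (i-1) 0 + pvCost a b i 0)) t1) i 0 = pvT a b i 0) := by
  intro m
  induction m with
  | zero => intro hm; exact ⟨h1, by intro i hi; interval_cases i; exact hT⟩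
  | succ m ih =>
    intro hm
    obtain ⟨hd, hg⟩ := ih (by omega)
    rw [List.range'_1_concat, List.foldl_append, List.foldl_cons, List.foldl_nil]
    set t := (List.range' 1 m).foldl
      (fun t i => pvS2 t i 0 (pvG2 t (i-1) 0 + pvCost a b i 0)) t1 with ht
    have hval : pvG2 t (1 + m - 1) 0 + pvCost a b (1+m) 0 = pvT a b (m+1) 0 := by
      have : 1 + m - 1 = m := by omega
      rw [this, hg m (by omega)]
      rw [show (1+m) = m+1 from by omega]
      rw [show pvT a b (m+1) 0 = pvT a b m 0 + pvCost a b (m+1) 0 from by rw [pvT]]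
    refine ⟨pvDims_pvS2 hd _ _ _, ?_⟩
    intro i hi
    by_cases hieq : i = m+1
    · subst hieq
      rw [hval, show (1+m) = m+1 from by omega]
      exact pvG2_pvS2_same hd (by omega) (by omega) _
    · rw [pvG2_pvS2_ne (by omega) _]
      exact hg i (by omega)

lemma pvPhase3 (a b : List Int) (n : Nat) (t2 : List (List Int))
    (h1 : pvDims t2 n) (hcol : ∀ i, i < n → pvG2 t2 i 0 = pvT a b i 0) :
    ∀ m, m < n →
      pvDims ((List.range' 1 m).foldl
        (fun t j => pvS2 t 0 j (min (pvG2 t 0 (j-1)) (pvCost a b 0 j))) t2) n ∧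
      (∀ i, i < n → pvG2 ((List.range' 1 m).foldl
        (fun t j => pvS2 t 0 j (min (pvG2 t 0 (j-1)) (pvCost a b 0 j))) t2) i 0 = pvT a b i 0) ∧
      (∀ j, j ≤ m → pvG2 ((List.range' 1 m).foldl
        (fun t j => pvS2 t 0 j (min (pvG2 t 0 (j-1)) (pvCost a b 0 j))) t2) 0 j = pvT a b 0 j) := by
  intro m
  induction m with
  | zero =>
    intro hm
    exact ⟨h1, hcol, by intro j hj; interval_cases j; exact hcol 0 (by omega)⟩
  | succ m ih =>
    intro hm
    obtain ⟨hd, hc, hg⟩ := ih (by omega)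
    rw [List.range'_1_concat, List.foldl_append, List.foldl_cons, List.foldl_nil]
    set t := (List.range' 1 m).foldl
      (fun t j => pvS2 t 0 j (min (pvG2 t 0 (j-1)) (pvCost a b 0 j))) t2 with ht
    have hval : min (pvG2 t 0 (1+m-1)) (pvCost a b 0 (1+m)) = pvT a b 0 (m+1) := by
      have e1 : 1 + m - 1 = m := by omega
      have e2 : 1 + m = m + 1 := by omega
      rw [e1, e2, hg m (by omega)]
      rw [show pvT a b 0 (m+1) = min (pvT a b 0 m) (pvCost a b 0 (m+1)) from by rw [pvT]]
    refine ⟨pvDims_pvS2 hd _ _ _, ?_, ?_⟩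
    · intro i hi
      rw [pvG2_pvS2_ne (by omega) _]
      exact hc i hi
    · intro j hj
      by_cases hjeq : j = m+1
      · subst hjeq
        rw [hval, show (1+m) = m+1 from by omega]
        exact pvG2_pvS2_same hd (by omega) (by omega) _
      · rw [pvG2_pvS2_ne (by omega) _]
        exact hg j (by omega)

lemma pvPhase4Inner (a b : List Int) (n : Nat) (i : Nat) (hi1 : 1 ≤ i) (hin : i < n)
    (t : List (List Int)) (hd : pvDims t n)
    (hcol : ∀ i', i' < n → pvG2 t i' 0 = pvT a b i' 0)
    (hrow : ∀ j, j < n → pvG2 t (i-1) j = pvT a b (i-1) j) :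
    ∀ m, m < n →
      pvDims ((List.range' 1 m).foldl
        (fun t j => pvS2 t i j (min (pvG2 t i (j-1)) (pvG2 t (i-1) j + pvCost a b i j))) t) n ∧
      (∀ i', i' < n → pvG2 ((List.range' 1 m).foldl
        (fun t j => pvS2 t i j (min (pvG2 t i (j-1)) (pvG2 t (i-1) j + pvCost a b i j))) t) i' 0 = pvT a b i' 0) ∧
      (∀ j, j < n → pvG2 ((List.range' 1 m).foldl
        (fun t j => pvS2 t i j (min (pvG2 t i (j-1)) (pvG2 t (i-1) j + pvCost a b i j))) t) (i-1) j = pvT a b (i-1) j) ∧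
      (∀ j, j ≤ m → pvG2 ((List.range' 1 m).foldl
        (fun t j => pvS2 t i j (min (pvG2 t i (j-1)) (pvG2 t (i-1) j + pvCost a b i j))) t) i j = pvT a b i j) := by
  intro m
  induction m with
  | zero =>
    intro hm
    exact ⟨hd, hcol, hrow, by intro j hj; interval_cases j; exact hcol i hin⟩
  | succ m ih =>
    intro hm
    obtain ⟨hd', hc, hr, hg⟩ := ih (by omega)
    rw [List.range'_1_concat, List.foldl_append, List.foldl_cons, List.foldl_nil]
    set t' := (List.range' 1 m).foldl
      (fun t j => pvS2 t i j (min (pvG2 t i (j-1)) (pvG2 t (i-1) j + pvCost a b i j))) t with ht'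
    obtain ⟨q, rfl⟩ : ∃ q, i = q + 1 := ⟨i - 1, by omega⟩
    have hq : q + 1 - 1 = q := by omega
    have hval : min (pvG2 t' (q+1) (1+m-1)) (pvG2 t' (q+1-1) (1+m) + pvCost a b (q+1) (1+m))
        = pvT a b (q+1) (m+1) := by
      have e1 : 1 + m - 1 = m := by omega
      have e2 : 1 + m = m + 1 := by omega
      have hr' := hr (m+1) (by omega)
      rw [hq] at hr'
      rw [e1, e2, hq, hg m (by omega), hr']
      rw [show pvT a b (q+1) (m+1)
            = min (pvT a b (q+1) m) (pvT a b q (m+1) + pvCost a b (q+1) (m+1)) from by rw [pvT]]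
    refine ⟨pvDims_pvS2 hd' _ _ _, ?_, ?_, ?_⟩
    · intro i' hi'
      rw [pvG2_pvS2_ne (by omega) _]
      exact hc i' hi'
    · intro j hj
      rw [hq, pvG2_pvS2_ne (by omega) _]
      have := hr j hj
      rw [hq] at this
      exact this
    · intro j hj
      by_cases hjeq : j = m+1
      · subst hjeq
        rw [hval, show (1+m) = m+1 from by omega]
        exact pvG2_pvS2_same hd' (by omega) (by omega) _
      · rw [pvG2_pvS2_ne (by omega) _]
        exact hg j (by omega)

lemma pvPhase4Outer (a b : List Int) (n : Nat) (t3 : List (List Int))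
    (hd : pvDims t3 n)
    (hcol : ∀ i, i < n → pvG2 t3 i 0 = pvT a b i 0)
    (hrow0 : ∀ j, j < n → pvG2 t3 0 j = pvT a b 0 j) :
    ∀ m, m < n →
      pvDims ((List.range' 1 m).foldl
        (fun t i => (List.range' 1 (n-1)).foldl
          (fun t j => pvS2 t i j (min (pvG2 t i (j-1)) (pvG2 t (i-1) j + pvCost a b i j))) t) t3) n ∧
      (∀ i, i < n → pvG2 ((List.range' 1 m).foldl
        (fun t i => (List.range' 1 (n-1)).foldl
          (fun t j => pvS2 t i j (min (pvG2 t i (j-1)) (pvG2 t (i-1) j + pvCost a b i j))) t) t3) i 0 = pvT a b i 0) ∧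
      (∀ j, j < n → pvG2 ((List.range' 1 m).foldl
        (fun t i => (List.range' 1 (n-1)).foldl
          (fun t j => pvS2 t i j (min (pvG2 t i (j-1)) (pvG2 t (i-1) j + pvCost a b i j))) t) t3) m j = pvT a b m j) := by
  intro m
  induction m with
  | zero => intro hm; exact ⟨hd, hcol, hrow0⟩
  | succ m ih =>
    intro hm
    obtain ⟨hd', hc, hr⟩ := ih (by omega)
    rw [List.range'_1_concat, List.foldl_append, List.foldl_cons, List.foldl_nil]
    set t := (List.range' 1 m).foldl
      (fun t i => (List.range' 1 (n-1)).foldl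
        (fun t j => pvS2 t i j (min (pvG2 t i (j-1)) (pvG2 t (i-1) j + pvCost a b i j))) t) t3 with ht
    have hrow : ∀ j, j < n → pvG2 t ((1+m) - 1) j = pvT a b ((1+m) - 1) j := by
      intro j hj
      rw [show (1+m) - 1 = m from by omega]
      exact hr j hj
    have := pvPhase4Inner a b n (1+m) (by omega) (by omega) t hd' hc hrow (n-1) (by omega)
    obtain ⟨hd2, hc2, _, hg2⟩ := this
    refine ⟨hd2, hc2, ?_⟩
    intro j hj
    rw [show m + 1 = 1 + m from by omega]
    exact hg2 j (by omega)

-- A's program returns pvT (n-1) (n-1)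
lemma pvA_eq_T (nums : List Int) (h : nums ≠ []) :
    min_moves_non_descreasing nums
      = pvT nums (PySem.List.sorted nums (fun x => x) false) (nums.length - 1) (nums.length - 1) := by
  have hn1 : 1 ≤ nums.length := List.length_pos_iff.mpr h
  simp only [min_moves_non_descreasing, PySem.List.len_eq, pvPyRangeNat, List.foldl_map]
  set b := PySem.List.sorted nums (fun x => x) false with hb
  set n := nums.length with hn
  set dp0 : List (List Int) :=
    (PySem.List.pyRange 0 (n:Int) 1).map (fun _ => (PySem.List.pyRange 0 (n:Int) 1).map (fun _ => (0:Int))) with hdp0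
  have hdims0 : pvDims dp0 n := by
    constructor
    · simp [hdp0, PySem.List.length_pyRange_one]
    · intro r hr
      rw [hdp0] at hr
      obtain ⟨_, _, rfl⟩ := List.mem_map.mp hr
      simp [PySem.List.length_pyRange_one]
  have hdp1 : pvSet2 dp0 0 0 |pvGetA nums 0 - pvGetA b 0| = pvS2 dp0 0 0 (pvCost nums b 0 0) := by
    rw [pvSet2_toNat _ _ _ _ le_rfl le_rfl, pvGetA_toNat _ _ le_rfl, pvGetA_toNat _ _ le_rfl]
    rfl
  rw [hdp1]
  set dp1 := pvS2 dp0 0 0 (pvCost nums b 0 0) with hdp1'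
  have hdims1 : pvDims dp1 n := pvDims_pvS2 hdims0 _ _ _
  have hT1 : pvG2 dp1 0 0 = pvT nums b 0 0 := by
    rw [hdp1', pvG2_pvS2_same hdims0 (by omega) (by omega), pvT]
  have e2 : ∀ init : List (List Int),
      List.foldl (fun t (k : Nat) => pvSet2 t (k:Int) 0 (pvGet2 t ((k:Int)-1) 0 + |pvGetA nums (k:Int) - pvGetA b 0|)) init (List.range' 1 (n-1))
        = List.foldl (fun t k => pvS2 t k 0 (pvG2 t (k-1) 0 + pvCost nums b k 0)) init (List.range' 1 (n-1)) := by
    intro init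
    apply PySem.List.foldl_congr_mem
    intro t k hk
    have h1 : 1 ≤ k := (List.mem_range'_1.mp hk).1
    rw [pvSet2_toNat _ _ _ _ (by positivity) le_rfl,
      pvGet2_toNat _ _ _ (by omega : (0:Int) ≤ (k:Int)-1) le_rfl,
      pvGetA_toNat _ _ (by positivity), pvGetA_toNat _ _ le_rfl]
    have e : ((k:Int) - 1).toNat = k - 1 := by omega
    simp [e, pvCost]
  rw [e2]
  obtain ⟨hdims2, hcol2⟩ := pvPhase2 nums b n dp1 hdims1 hT1 (n-1) (by omega)
  set dp2 := List.foldl (fun t k => pvS2 t k 0 (pvG2 t (k-1) 0 + pvCost nums b k 0)) dp1 (List.range' 1 (n-1)) with hdp2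
  have hcol2' : ∀ i, i < n → pvG2 dp2 i 0 = pvT nums b i 0 := fun i hi => hcol2 i (by omega)
  have e3 : ∀ init : List (List Int),
      List.foldl (fun t (k : Nat) => pvSet2 t 0 (k:Int) (min (pvGet2 t 0 ((k:Int)-1)) |pvGetA nums 0 - pvGetA b (k:Int)|)) init (List.range' 1 (n-1))
        = List.foldl (fun t k => pvS2 t 0 k (min (pvG2 t 0 (k-1)) (pvCost nums b 0 k))) init (List.range' 1 (n-1)) := by
    intro init
    apply PySem.List.foldl_congr_mem
    intro t k hk
    have h1 : 1 ≤ k := (List.mem_range'_1.mp hk).1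
    rw [pvSet2_toNat _ _ _ _ le_rfl (by positivity),
      pvGet2_toNat _ _ _ le_rfl (by omega : (0:Int) ≤ (k:Int)-1),
      pvGetA_toNat _ _ le_rfl, pvGetA_toNat _ _ (by positivity)]
    have e : ((k:Int) - 1).toNat = k - 1 := by omega
    simp [e, pvCost]
  rw [e3]
  obtain ⟨hdims3, hcol3, hrow3⟩ := pvPhase3 nums b n dp2 hdims2 hcol2' (n-1) (by omega)
  set dp3 := List.foldl (fun t k => pvS2 t 0 k (min (pvG2 t 0 (k-1)) (pvCost nums b 0 k))) dp2 (List.range' 1 (n-1)) with hdp3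
  have hrow3' : ∀ j, j < n → pvG2 dp3 0 j = pvT nums b 0 j := fun j hj => hrow3 j (by omega)
  have e4 : ∀ init : List (List Int),
      List.foldl (fun t (i : Nat) =>
        List.foldl (fun t (k : Nat) => pvSet2 t (i:Int) (k:Int)
          (min (pvGet2 t (i:Int) ((k:Int)-1)) (pvGet2 t ((i:Int)-1) (k:Int) + |pvGetA nums (i:Int) - pvGetA b (k:Int)|))) t (List.range' 1 (n-1))) init (List.range' 1 (n-1))
        = List.foldl (fun t i =>
            List.foldl (fun t j => pvS2 t i j (min (pvG2 t i (j-1)) (pvG2 t (i-1) j + pvCost nums b i j))) t (List.range' 1 (n-1))) init (List.range' 1 (n-1)) := by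
    intro init
    apply PySem.List.foldl_congr_mem
    intro t i hi
    have hi1 : 1 ≤ i := (List.mem_range'_1.mp hi).1
    apply PySem.List.foldl_congr_mem
    intro t' k hk
    have h1 : 1 ≤ k := (List.mem_range'_1.mp hk).1
    rw [pvSet2_toNat _ _ _ _ (by positivity) (by positivity),
      pvGet2_toNat _ _ _ (by positivity) (by omega : (0:Int) ≤ (k:Int)-1),
      pvGet2_toNat _ _ _ (by omega : (0:Int) ≤ (i:Int)-1) (by positivity),
      pvGetA_toNat _ _ (by positivity), pvGetA_toNat _ _ (by positivity)]
    have ek : ((k:Int) - 1).toNat = k - 1 := by omega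
    have ei : ((i:Int) - 1).toNat = i - 1 := by omega
    simp [ek, ei, pvCost]
  rw [e4]
  obtain ⟨hdims4, hcol4, hrowlast⟩ := pvPhase4Outer nums b n dp3 hdims3 hcol3 hrow3' (n-1) (by omega)
  rw [pvGet2_toNat _ _ _ (by omega : (0:Int) ≤ (n:Int)-1) (by omega : (0:Int) ≤ (n:Int)-1)]
  have e : ((n:Int) - 1).toNat = n - 1 := by omega
  rw [e]
  exact hrowlast (n-1) (by omega)

-- ---- B side: slope-trick invariant ----

-- total cost function encoded by the breakpoint multiset: Σ max(h - v, 0)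
def pvS (T : List Int) (v : Int) : Int := (T.map (fun h => max (h - v) 0)).sum

lemma pvS_nil (v : Int) : pvS [] v = 0 := rfl

lemma pvS_cons (h : Int) (T : List Int) (v : Int) :
    pvS (h :: T) v = max (h - v) 0 + pvS T v := by simp [pvS]

lemma pvS_append (T1 T2 : List Int) (v : Int) : pvS (T1 ++ T2) v = pvS T1 v + pvS T2 v := by
  simp [pvS]

lemma pvS_nonneg (T : List Int) (v : Int) : 0 ≤ pvS T v := by
  induction T with
  | nil => simp [pvS]
  | cons h t ih => rw [pvS_cons]; omega

lemma pvS_mono {u v : Int} (T : List Int) (h : u ≤ v) : pvS T v ≤ pvS T u := by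
  induction T with
  | nil => simp [pvS]
  | cons x t ih => rw [pvS_cons, pvS_cons]; omega

lemma pvS_zero {T : List Int} {v : Int} (h : ∀ x ∈ T, x ≤ v) : pvS T v = 0 := by
  induction T with
  | nil => rfl
  | cons x t ih =>
    rw [pvS_cons, ih (fun y hy => h y (List.mem_cons_of_mem x hy))]
    have := h x (List.mem_cons_self)
    omega

lemma pvS_perm {T T' : List Int} (h : T.Perm T') (v : Int) : pvS T v = pvS T' v :=
  (h.map _).sum_eq

lemma pvS_erase {m : Int} {T : List Int} (hm : m ∈ T) (v : Int) :
    pvS T v = max (m - v) 0 + pvS (T.erase m) v := by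
  rw [pvS_perm (List.perm_cons_erase hm), pvS_cons]

-- ---- sorted-list facts about b ----
lemma pvB_mono {b : List Int} (hpair : b.Pairwise (· ≤ ·)) {i j : Nat}
    (hij : i ≤ j) (hj : j < b.length) : b.getD i 0 ≤ b.getD j 0 := by
  rcases Nat.eq_or_lt_of_le hij with rfl | hlt
  · exact le_refl _
  · have hi : i < b.length := by omega
    rw [List.getD_eq_getElem b 0 hi, List.getD_eq_getElem b 0 hj]
    exact List.pairwise_iff_getElem.mp hpair i j hi hj hlt

lemma pvB_first_le {b : List Int} (hpair : b.Pairwise (· ≤ ·)) {v : Int} (hv : v ∈ b) :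
    b.getD 0 0 ≤ v := by
  obtain ⟨t, ht, rfl⟩ := List.mem_iff_getElem.mp hv
  rw [← List.getD_eq_getElem b 0 ht]
  exact pvB_mono hpair (Nat.zero_le t) ht

lemma pvB_le_last {b : List Int} (hpair : b.Pairwise (· ≤ ·)) {v : Int} (hv : v ∈ b) :
    v ≤ b.getD (b.length - 1) 0 := by
  obtain ⟨t, ht, rfl⟩ := List.mem_iff_getElem.mp hv
  rw [← List.getD_eq_getElem b 0 ht]
  exact pvB_mono hpair (by omega) (by omega)

-- a member v of sorted b that is ≤ b[j+1] is b[j+1] itself or already ≤ b[j]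
lemma pvB_occ {b : List Int} (hpair : b.Pairwise (· ≤ ·)) {v : Int} (hv : v ∈ b) {j : Nat}
    (hj : j + 1 < b.length) (hle : v ≤ b.getD (j+1) 0) :
    b.getD (j+1) 0 = v ∨ v ≤ b.getD j 0 := by
  obtain ⟨t, ht, rfl⟩ := List.mem_iff_getElem.mp hv
  rcases le_or_gt t j with h | h
  · right
    rw [← List.getD_eq_getElem b 0 ht]
    exact pvB_mono hpair h (by omega)
  · left
    have h1 : b.getD (j+1) 0 ≤ b[t] := by
      rw [← List.getD_eq_getElem b 0 ht]
      exact pvB_mono hpair h ht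
    omega

-- ---- the chain lemma: the j-recursion of row k+1 is a running min ----
lemma pvChainSucc (a b : List Int) (k : Nat) (F : Int → Int)
    (h0 : pvT a b (k+1) 0 = F (b.getD 0 0))
    (hstep : ∀ j, j + 1 < b.length →
      min (F (b.getD j 0)) (pvT a b k (j+1) + pvCost a b (k+1) (j+1)) = F (b.getD (j+1) 0)) :
    ∀ j, j < b.length → pvT a b (k+1) j = F (b.getD j 0) := by
  intro j
  induction j with
  | zero => intro _; exact h0
  | succ j ih =>
    intro hj
    rw [show pvT a b (k+1) (j+1)
        = min (pvT a b (k+1) j) (pvT a b k (j+1) + pvCost a b (k+1) (j+1)) from by rw [pvT]]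
    rw [ih (by omega)]
    exact hstep j hj

lemma pvChainZero (a b : List Int) (F : Int → Int)
    (h0 : pvT a b 0 0 = F (b.getD 0 0))
    (hstep : ∀ j, j + 1 < b.length →
      min (F (b.getD j 0)) (pvCost a b 0 (j+1)) = F (b.getD (j+1) 0)) :
    ∀ j, j < b.length → pvT a b 0 j = F (b.getD j 0) := by
  intro j
  induction j with
  | zero => intro _; exact h0
  | succ j ih =>
    intro hj
    rw [show pvT a b 0 (j+1) = min (pvT a b 0 j) (pvCost a b 0 (j+1)) from by rw [pvT]]
    rw [ih (by omega)]
    exact hstep j hj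

-- the greedy invariant: the state after row k encodes the whole DP row k
def pvInv (a b : List Int) (k : Nat) (st : List Int × Int) : Prop :=
  (∀ h ∈ st.1, h ∈ b) ∧
  ∀ j, j < b.length → pvT a b k j = st.2 + pvS st.1 (b.getD j 0)

-- row 0: the first greedy step
lemma pvBase (a b : List Int) (hpair : b.Pairwise (· ≤ ·)) (x : Int)
    (hx : x ∈ b) (hxat : a.getD 0 0 = x) :
    pvInv a b 0 (pvStepB ([], 0) x) := by
  have hstep : pvStepB ([], 0) x = ([x], 0) := by
    simp [pvStepB, PySem.List.max?_id_cons]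
  rw [hstep]
  refine ⟨by intro h hh; simp at hh; subst hh; exact hx, pvChainZero a b (fun v => ([x], (0:Int)).2 + pvS ([x], (0:Int)).1 v) ?_ ?_⟩
  · show pvT a b 0 0 = 0 + pvS [x] (b.getD 0 0)
    have hb0 : b.getD 0 0 ≤ x := pvB_first_le hpair hx
    rw [show pvT a b 0 0 = pvCost a b 0 0 from by rw [pvT]]
    simp only [pvCost, hxat, pvS_cons, pvS_nil]
    rw [abs_of_nonneg (by omega)]
    omega
  · intro j hj
    show min (0 + pvS [x] (b.getD j 0)) (pvCost a b 0 (j+1)) = 0 + pvS [x] (b.getD (j+1) 0)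
    simp only [pvCost, hxat, pvS_cons, pvS_nil]
    rcases le_or_gt (b.getD (j+1) 0) x with hc | hc
    · have hmono : b.getD j 0 ≤ b.getD (j+1) 0 := pvB_mono hpair (by omega) hj
      rw [abs_of_nonneg (by omega)]
      omega
    · rcases pvB_occ hpair hx hj (by omega) with he | he
      · omega
      · rw [abs_of_nonpos (by omega)]
        omega

-- one greedy step preserves the invariant
lemma pvStep_inv (a b : List Int) (hpair : b.Pairwise (· ≤ ·)) (k : Nat)
    (T : List Int) (ans : Int) (x : Int) (hx : x ∈ b) (hxat : a.getD (k+1) 0 = x)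
    (hinv : pvInv a b k (T, ans)) : pvInv a b (k+1) (pvStepB (T, ans) x) := by
  obtain ⟨hmem, hrow⟩ := hinv
  simp only at hmem hrow
  obtain ⟨m, hm⟩ : ∃ m, PySem.List.max? (T ++ [x]) (fun y => y) = some m := by
    rcases ho : PySem.List.max? (T ++ [x]) (fun y => y) with _ | m
    · rw [PySem.List.max?_eq_none_iff] at ho
      simp at ho
    · exact ⟨m, rfl⟩
  have hm_mem : m ∈ T ++ [x] := PySem.List.max?_mem hm
  have hm_max : ∀ y ∈ T ++ [x], y ≤ m := PySem.List.max?_isMax hm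
  have hm_b : m ∈ b := by
    rcases List.mem_append.mp hm_mem with h | h
    · exact hmem m h
    · simp at h; subst h; exact hx
  have htops_b : ∀ h ∈ T ++ [x], h ∈ b := by
    intro h hh
    rcases List.mem_append.mp hh with h' | h'
    · exact hmem h h'
    · simp at h'; subst h'; exact hx
  have hxm : x ≤ m := hm_max x (by simp)
  have hblen : 0 < b.length := List.length_pos_of_mem hm_b
  have hcomp : pvStepB (T, ans) x
      = if m > x then ((PySem.List.remove? (T ++ [x]) m).getD (T ++ [x]) ++ [x], ans + (m - x))
        else (T ++ [x], ans) := by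
    simp only [pvStepB, hm, Option.getD_some]
  rw [hcomp]
  by_cases hgt : m > x
  · -- replace m (which lies in T) by x, pay m - x
    rw [if_pos hgt]
    rw [PySem.List.remove?_eq_some_erase (T ++ [x]) m hm_mem, Option.getD_some]
    have hE_le : ∀ h ∈ (T ++ [x]).erase m, h ≤ m :=
      fun h hh => hm_max h (List.mem_of_mem_erase hh)
    have hTn_b : ∀ h ∈ (T ++ [x]).erase m ++ [x], h ∈ b := by
      intro h hh
      rcases List.mem_append.mp hh with h' | h'
      · exact htops_b h (List.mem_of_mem_erase h')
      · simp at h'; subst h'; exact hx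
    -- pvS bookkeeping relative to E := (T ++ [x]).erase m
    have hsplit : ∀ v, pvS T v
        = max (m - v) 0 + pvS ((T ++ [x]).erase m) v - max (x - v) 0 := by
      intro v
      have h1 : pvS (T ++ [x]) v = pvS T v + max (x - v) 0 := by
        rw [pvS_append, pvS_cons, pvS_nil]; ring
      have h2 : pvS (T ++ [x]) v = max (m - v) 0 + pvS ((T ++ [x]).erase m) v :=
        pvS_erase hm_mem v
      omega
    have hnew : ∀ v, pvS ((T ++ [x]).erase m ++ [x]) v
        = pvS ((T ++ [x]).erase m) v + max (x - v) 0 := by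
      intro v
      rw [pvS_append, pvS_cons, pvS_nil]; ring
    refine ⟨hTn_b, pvChainSucc a b k (fun v => ans + (m - x) + pvS ((T ++ [x]).erase m ++ [x]) v) ?_ ?_⟩
    · -- base column j = 0
      show pvT a b (k+1) 0
          = ans + (m - x) + pvS ((T ++ [x]).erase m ++ [x]) (b.getD 0 0)
      have hb0x : b.getD 0 0 ≤ x := pvB_first_le hpair hx
      rw [show pvT a b (k+1) 0 = pvT a b k 0 + pvCost a b (k+1) 0 from by rw [pvT]]
      rw [hrow 0 hblen, pvCost, hxat, hsplit (b.getD 0 0), hnew (b.getD 0 0)]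
      rw [abs_of_nonneg (by omega)]
      omega
    · intro j hj
      show min (ans + (m - x) + pvS ((T ++ [x]).erase m ++ [x]) (b.getD j 0))
            (pvT a b k (j+1) + pvCost a b (k+1) (j+1))
          = ans + (m - x) + pvS ((T ++ [x]).erase m ++ [x]) (b.getD (j+1) 0)
      rw [hrow (j+1) hj, pvCost, hxat]
      have huv : b.getD j 0 ≤ b.getD (j+1) 0 := pvB_mono hpair (by omega) hj
      rw [hsplit (b.getD (j+1) 0), hnew (b.getD j 0), hnew (b.getD (j+1) 0)]
      set u := b.getD j 0 with hu
      set v := b.getD (j+1) 0 with hv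
      have hEmono : pvS ((T ++ [x]).erase m) v ≤ pvS ((T ++ [x]).erase m) u :=
        pvS_mono _ huv
      have hEnn : 0 ≤ pvS ((T ++ [x]).erase m) v := pvS_nonneg _ _
      have hEnnu : 0 ≤ pvS ((T ++ [x]).erase m) u := pvS_nonneg _ _
      rcases lt_or_ge v m with hvm | hvm
      · -- v < m: the fresh column term equals the new value
        rcases le_or_gt x v with hc | hc
        · rw [abs_of_nonpos (by omega)]
          omega
        · rw [abs_of_nonneg (by omega)]
          omega
      · -- m ≤ v: everything collapses to m - x
        have hEv0 : pvS ((T ++ [x]).erase m) v = 0 :=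
          pvS_zero (fun h hh => le_trans (hE_le h hh) (by omega))
        rw [abs_of_nonpos (by omega)]
        rcases pvB_occ hpair hm_b hj hvm with he | he
        · omega
        · have hEu0 : pvS ((T ++ [x]).erase m) u = 0 :=
            pvS_zero (fun h hh => le_trans (hE_le h hh) (by omega))
          omega
  · -- m = x: append x, pay nothing
    rw [if_neg hgt]
    have hmx : m = x := by omega
    refine ⟨htops_b, pvChainSucc a b k (fun v => ans + pvS (T ++ [x]) v) ?_ ?_⟩
    · show pvT a b (k+1) 0 = ans + pvS (T ++ [x]) (b.getD 0 0)
      have hb0x : b.getD 0 0 ≤ x := pvB_first_le hpair hx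
      rw [show pvT a b (k+1) 0 = pvT a b k 0 + pvCost a b (k+1) 0 from by rw [pvT]]
      rw [hrow 0 hblen, pvCost, hxat]
      simp only [pvS_append, pvS_cons, pvS_nil]
      rw [abs_of_nonneg (by omega)]
      omega
    · intro j hj
      show min (ans + pvS (T ++ [x]) (b.getD j 0))
            (pvT a b k (j+1) + pvCost a b (k+1) (j+1))
          = ans + pvS (T ++ [x]) (b.getD (j+1) 0)
      rw [hrow (j+1) hj, pvCost, hxat]
      have huv : b.getD j 0 ≤ b.getD (j+1) 0 := pvB_mono hpair (by omega) hj
      simp only [pvS_append, pvS_cons, pvS_nil]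
      have hmono : pvS T (b.getD (j+1) 0) ≤ pvS T (b.getD j 0) := pvS_mono _ huv
      rcases le_or_gt (b.getD (j+1) 0) x with hc | hc
      · rw [abs_of_nonneg (by omega)]
        omega
      · have hTv0 : pvS T (b.getD (j+1) 0) = 0 := pvS_zero (by
          intro h hh
          have := hm_max h (List.mem_append_left _ hh)
          omega)
        rcases pvB_occ hpair hx hj (by omega) with he | he
        · omega
        · have hTu0 : pvS T (b.getD j 0) = 0 := pvS_zero (by
            intro h hh
            have := hm_max h (List.mem_append_left _ hh)
            omega)
          rw [abs_of_nonpos (by omega)]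
          omega

lemma pvGetD_of_drop {a : List Int} {p : Nat} {x : Int} {l : List Int}
    (h : a.drop p = x :: l) : a.getD p 0 = x := by
  have hx : a[p]? = some x := by
    rw [← List.head?_drop, h, List.head?_cons]
  rw [List.getD_eq_getElem?_getD, hx, Option.getD_some]

-- running the greedy over the rest of the list advances the invariant row by row
lemma pvRun (a b : List Int) (hpair : b.Pairwise (· ≤ ·)) (hab : ∀ y ∈ a, y ∈ b) :
    ∀ (rest : List Int) (k : Nat) (st : List Int × Int),
      a.drop (k+1) = rest → pvInv a b k st →
      pvInv a b (k + rest.length) (rest.foldl pvStepB st) := by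
  intro rest
  induction rest with
  | nil => intro k st _ hinv; simpa using hinv
  | cons x r ih =>
    intro k st hdrop hinv
    obtain ⟨T, ans⟩ := st
    have hxat : a.getD (k+1) 0 = x := pvGetD_of_drop hdrop
    have hxa : x ∈ a := List.mem_of_mem_drop (by rw [hdrop]; exact List.mem_cons_self)
    have hdrop' : a.drop (k+2) = r := by
      have := congrArg List.tail hdrop
      simpa [List.tail_drop] using this
    have h1 := pvStep_inv a b hpair k T ans x (hab x hxa) hxat hinv
    have h2 := ih (k+1) (pvStepB (T, ans) x) hdrop' h1
    simp only [List.length_cons, List.foldl_cons]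
    rw [show k + (r.length + 1) = k + 1 + r.length from by omega]
    exact h2

-- B's program also returns pvT (n-1) (n-1)
lemma pvAlt_eq_T (nums : List Int) (h : nums ≠ []) :
    min_moves_non_descreasing_alt nums
      = pvT nums (PySem.List.sorted nums (fun x => x) false) (nums.length - 1) (nums.length - 1) := by
  set b := PySem.List.sorted nums (fun x => x) false with hb
  have hpair : b.Pairwise (· ≤ ·) := PySem.List.sorted_pairwise nums (fun x => x)
  have hperm : b.Perm nums := PySem.List.sorted_perm nums (fun x => x) false
  have hab : ∀ y ∈ nums, y ∈ b := fun y hy => hperm.mem_iff.mpr hy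
  have hbl : b.length = nums.length := PySem.List.length_sorted ..
  obtain ⟨x0, rest, rfl⟩ : ∃ x0 rest, nums = x0 :: rest := by
    rcases nums with _ | ⟨x0, rest⟩
    · exact absurd rfl h
    · exact ⟨x0, rest, rfl⟩
  have hbase : pvInv (x0 :: rest) b 0 (pvStepB ([], 0) x0) :=
    pvBase (x0 :: rest) b hpair x0 (hab x0 List.mem_cons_self) rfl
  have hrun := pvRun (x0 :: rest) b hpair hab rest 0 (pvStepB ([], 0) x0) rfl hbase
  obtain ⟨hmemf, hrowf⟩ := hrun
  simp only [Nat.zero_add] at hmemf hrowf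
  have hlen : (x0 :: rest).length - 1 = rest.length := by simp
  have hjlt : rest.length < b.length := by
    rw [hbl]; simp
  have := hrowf rest.length hjlt
  have hS0 : pvS ((rest.foldl pvStepB (pvStepB ([], 0) x0)).1)
      (b.getD rest.length 0) = 0 := by
    apply pvS_zero
    intro hh hmem
    have h1 := pvB_le_last hpair (hmemf hh hmem)
    rw [hbl] at h1
    simpa using h1
  rw [hS0] at this
  simp only [min_moves_non_descreasing_alt, List.foldl_cons]
  rw [hlen]
  omega

-- ===== VERDICT (by name: the statement is the Claim_ definition above) =====
theorem min_moves_non_descreasing_spec : Claim_equal_min_moves_non_descreasing := by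
  intro nums _ hpre
  unfold Spec_min_moves_non_descreasing
  rw [pvA_eq_T nums hpre, pvAlt_eq_T nums hpre]
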